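-- pv_equiv track=rewrite | github.com/Alirezak2n/Mokapot_Zenodo | Scripts/utilities.py | protein_encoder
-- ===== SOURCE A (Python) =====
-- def protein_encoder(protein):
--     encod = []
--     if not isinstance(protein, list):
--         protein = [protein]
--     for prot in protein:
--         if prot == "HUMAN":
--             encod.append('1')
--         elif prot == "Contaminant":
--             encod.append('3')
--         elif prot == "Entrapment":
--             encod.append('2')
--     encod = list(set(encod))
--     return ('').join(sorted(encod))
-- ===== SOURCE B (Python) =====
-- def protein_encoder(protein):
--     if not isinstance(protein, list):
--         protein = [protein]
--     result = ""
--     for name, digit in [("HUMAN", "1"), ("Entrapment", "2"), ("Contaminant", "3")]: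
--         if name in protein:
--             result += digit
--     return result
-- ===== Notes on version B (the rewrite author's own statement) =====
-- stated objective: simpler
-- what changed: Instead of collecting a digit per element and then deduplicating with set() and sorting, B checks membership of each of the three category names once, in digit order, and concatenates the digits directly, so the set and the sort disappear.
import Mathlib
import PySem

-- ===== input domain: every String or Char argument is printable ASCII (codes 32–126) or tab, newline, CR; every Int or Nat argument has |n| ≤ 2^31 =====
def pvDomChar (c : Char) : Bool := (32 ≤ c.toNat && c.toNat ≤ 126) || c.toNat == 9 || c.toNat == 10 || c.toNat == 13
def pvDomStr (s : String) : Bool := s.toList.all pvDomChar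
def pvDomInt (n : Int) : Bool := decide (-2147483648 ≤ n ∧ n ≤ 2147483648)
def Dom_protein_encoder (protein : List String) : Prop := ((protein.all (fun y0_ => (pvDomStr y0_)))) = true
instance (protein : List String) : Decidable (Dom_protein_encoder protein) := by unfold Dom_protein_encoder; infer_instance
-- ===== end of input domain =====

-- B replaces A's per-element digit collection + set() + sorted() by three membership tests
-- in digit order with direct concatenation (objective: simpler).

-- ===== PORT A =====
def protein_encoder (protein : List String) : String :=
  let encod : List String := protein.foldl (fun encod prot =>
    if prot = "HUMAN" then encod ++ ["1"]
    else if prot = "Contaminant" then encod ++ ["3"]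
    else if prot = "Entrapment" then encod ++ ["2"]
    else encod) []
  let encod2 : List String := PySem.Set.ofList encod
  PySem.Str.join "" (PySem.List.sorted encod2 (fun x => x) false)

-- ===== PORT B =====
def protein_encoder_alt (protein : List String) : String :=
  [("HUMAN", "1"), ("Entrapment", "2"), ("Contaminant", "3")].foldl
    (fun result p => if p.1 ∈ protein then result ++ p.2 else result) ""

-- ===== PRECONDITION & SPEC =====
def Spec_protein_encoder (protein : List String) (out : String) : Prop := out = protein_encoder_alt protein
instance (protein : List String) (out : String) : Decidable (Spec_protein_encoder protein out) := by unfold Spec_protein_encoder; infer_instance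

-- ===== CLAIM (what is proved, stated in full; the proofs are below) =====
def Claim_equal_protein_encoder : Prop := ∀ (protein : List String), Dom_protein_encoder protein → Spec_protein_encoder protein (protein_encoder protein)

-- ===== LEMMAS AND PROOFS =====

-- the three digit strings are strictly increasing ('decide' cannot evaluate String '<')
lemma digit_lt_12 : (['1'] : List Char) < ['2'] := List.lex_eq_true_iff_lt.mp rfl
lemma digit_lt_13 : (['1'] : List Char) < ['3'] := List.lex_eq_true_iff_lt.mp rfl
lemma digit_lt_23 : (['2'] : List Char) < ['3'] := List.lex_eq_true_iff_lt.mp rfl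

-- membership characterisation of A's collection loop
lemma mem_encoder_loop (protein : List String) (acc : List String) (x : String) :
    (x ∈ protein.foldl (fun encod prot =>
      if prot = "HUMAN" then encod ++ ["1"]
      else if prot = "Contaminant" then encod ++ ["3"]
      else if prot = "Entrapment" then encod ++ ["2"]
      else encod) acc) ↔
    x ∈ acc ∨ (x = "1" ∧ "HUMAN" ∈ protein) ∨ (x = "3" ∧ "Contaminant" ∈ protein)
      ∨ (x = "2" ∧ "Entrapment" ∈ protein) := by
  induction protein generalizing acc with
  | nil => simp
  | cons p ps ih =>
    simp only [List.foldl_cons, List.mem_cons]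
    by_cases h1 : p = "HUMAN" <;> by_cases h2 : p = "Contaminant" <;>
      by_cases h3 : p = "Entrapment" <;>
      simp [h1, h2, h3, ih] <;> tauto

lemma sorted_ofList_encoder_loop (protein : List String) (L : List String)
    (hnd : L.Nodup) (hlt : L.Pairwise (fun a b => a < b))
    (hmem : ∀ x, x ∈ L ↔ (x = "1" ∧ "HUMAN" ∈ protein) ∨ (x = "3" ∧ "Contaminant" ∈ protein)
      ∨ (x = "2" ∧ "Entrapment" ∈ protein)) :
    PySem.List.sorted (PySem.Set.ofList (protein.foldl (fun encod prot =>
      if prot = "HUMAN" then encod ++ ["1"]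
      else if prot = "Contaminant" then encod ++ ["3"]
      else if prot = "Entrapment" then encod ++ ["2"]
      else encod) [])) (fun x => x) false = L := by
  apply PySem.List.sorted_eq_of_perm_of_pairwise_lt _ _ _ _ hlt
  apply (List.perm_ext_iff_of_nodup hnd (PySem.Set.nodup_ofList _)).mpr
  intro x
  rw [PySem.Set.mem_ofList, mem_encoder_loop, hmem]
  simp

-- ===== VERDICT (by name: the statement is the Claim_ definition above) =====
theorem protein_encoder_spec : Claim_equal_protein_encoder := by
  intro protein _
  unfold Spec_protein_encoder protein_encoder protein_encoder_alt
  by_cases h1 : "HUMAN" ∈ protein <;> by_cases h2 : "Entrapment" ∈ protein <;>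
    by_cases h3 : "Contaminant" ∈ protein <;>
    simp only [List.foldl_cons, List.foldl_nil, h1, h2, h3, if_pos, ite_false]
  · rw [sorted_ofList_encoder_loop protein ["1", "2", "3"] (by decide)
      (by simp [List.pairwise_cons, digit_lt_12, digit_lt_13, digit_lt_23])
      (by intro x; simp [h1, h2, h3]; tauto)]; decide
  · rw [sorted_ofList_encoder_loop protein ["1", "2"] (by decide)
      (by simp [List.pairwise_cons, digit_lt_12])
      (by intro x; simp [h1, h2, h3])]; decide
  · rw [sorted_ofList_encoder_loop protein ["1", "3"] (by decide)
      (by simp [List.pairwise_cons, digit_lt_13])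
      (by intro x; simp [h1, h2, h3])]; decide
  · rw [sorted_ofList_encoder_loop protein ["1"] (by decide) (by simp)
      (by intro x; simp [h1, h2, h3])]; decide
  · rw [sorted_ofList_encoder_loop protein ["2", "3"] (by decide)
      (by simp [List.pairwise_cons, digit_lt_23])
      (by intro x; simp [h1, h2, h3]; tauto)]; decide
  · rw [sorted_ofList_encoder_loop protein ["2"] (by decide) (by simp)
      (by intro x; simp [h1, h2, h3])]; decide
  · rw [sorted_ofList_encoder_loop protein ["3"] (by decide) (by simp)
      (by intro x; simp [h1, h2, h3])]; decide
  · rw [sorted_ofList_encoder_loop protein [] (by decide) (by simp)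
      (by intro x; simp [h1, h2, h3])]; decide
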